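-- pv_equiv track=rewrite | github.com/MrDebugger/neat_data_supplier_bot | main.py | columns_to_index
-- ===== SOURCE A (Python) =====
-- def columns_to_index(obj):
--     """Convert column letters to zero-based column indexes."""
--     columns = {}
--     for key, value in obj.items():
--         if isinstance(value, str) and 'Column' in value:
--             column = value.split()[-1].upper().strip()
--             index = sum((ord(char) - ord('A') + 1) * (26 ** exp) for exp, char in enumerate(reversed(column))) - 1
--             columns[key] = index
--     return columns
-- ===== SOURCE B (Python) =====
-- def _column_value(column):
--     """Bijective base-26 value of a column string, by Horner's method."""
--     index = 0
--     for char in column: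
--         index = index * 26 + (ord(char) - ord('A') + 1)
--     return index
--
--
-- def columns_to_index(obj):
--     """Convert column letters to zero-based column indexes."""
--     return {key: _column_value(value.split()[-1].upper().strip()) - 1
--             for key, value in obj.items()
--             if isinstance(value, str) and 'Column' in value}
-- ===== Notes on version B (the rewrite author's own statement) =====
-- stated objective: idiomatic
-- what changed: Replaces the reversed-enumerate sum of 26**exp powers with a forward Horner accumulation (index = index*26 + digit) and builds the result as a dict comprehension instead of a loop that mutates a dict.
import Mathlib
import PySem

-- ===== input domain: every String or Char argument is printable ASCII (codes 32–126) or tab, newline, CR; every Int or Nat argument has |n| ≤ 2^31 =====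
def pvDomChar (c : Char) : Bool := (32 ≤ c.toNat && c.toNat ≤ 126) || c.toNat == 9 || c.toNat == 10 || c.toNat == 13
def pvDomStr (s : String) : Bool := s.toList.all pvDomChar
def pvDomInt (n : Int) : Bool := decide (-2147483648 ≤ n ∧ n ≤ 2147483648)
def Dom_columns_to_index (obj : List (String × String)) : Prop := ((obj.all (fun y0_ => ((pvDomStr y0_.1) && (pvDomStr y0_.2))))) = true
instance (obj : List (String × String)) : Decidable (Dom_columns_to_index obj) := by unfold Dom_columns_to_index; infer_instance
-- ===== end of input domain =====

-- B replaces the reversed-enumerate sum of 26**exp powers with a forward Horner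
-- accumulation and builds the result dict by comprehension (objective: idiomatic).


-- ===== PORT A =====
-- value.split()[-1]: under the guard 'Column' in value, split() is nonempty, so the
-- .getD "" default branch is unreachable; 26 ** exp with exp = enumerate index ≥ 0,
-- ported as 26 ^ p.1.toNat.
def columns_to_index (obj : List (String × String)) : List (String × Int) :=
  (obj.foldl
    (fun (columns : PySem.Dict String Int) kv =>
      if PySem.Str.isIn "Column" kv.2 then
        let column : String :=
          PySem.Str.strip (PySem.Str.upper
            ((PySem.List.pyGet? (PySem.Str.split₀ kv.2) (-1)).getD ""))
        let index : Int :=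
          (PySem.List.enumerate column.toList.reverse 0).foldl
            (fun acc p => acc + ((p.2.toNat : Int) - 65 + 1) * (26 ^ p.1.toNat : Int)) 0 - 1
        columns.insert kv.1 index
      else columns)
    PySem.Dict.empty).items

-- ===== PORT B =====
-- Horner's method over the column string, left to right.
def hornerColumnValue (cs : List Char) : Int :=
  cs.foldl (fun index c => index * 26 + ((c.toNat : Int) - 65 + 1)) 0

-- dict comprehension = fold of Dict.insert over the filtered, mapped items
def columns_to_index_alt (obj : List (String × String)) : List (String × Int) :=
  (obj.foldl
    (fun (d : PySem.Dict String Int) kv =>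
      if PySem.Str.isIn "Column" kv.2 then
        d.insert kv.1
          (hornerColumnValue
            (PySem.Str.strip (PySem.Str.upper
              ((PySem.List.pyGet? (PySem.Str.split₀ kv.2) (-1)).getD ""))).toList - 1)
      else d)
    PySem.Dict.empty).items

-- ===== PRECONDITION & SPEC =====
def Spec_columns_to_index (obj : List (String × String)) (out : List (String × Int)) : Prop := out = columns_to_index_alt obj
instance (obj : List (String × String)) (out : List (String × Int)) : Decidable (Spec_columns_to_index obj out) := by unfold Spec_columns_to_index; infer_instance

-- ===== CLAIM (what is proved, stated in full; the proofs are below) =====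
def Claim_equal_columns_to_index : Prop := ∀ (obj : List (String × String)), Dom_columns_to_index obj → Spec_columns_to_index obj (columns_to_index obj)

-- ===== LEMMAS AND PROOFS =====

-- Horner with an arbitrary accumulator
theorem horner_init (cs : List Char) (a : Int) :
    cs.foldl (fun index c => index * 26 + ((c.toNat : Int) - 65 + 1)) a
      = a * 26 ^ cs.length + hornerColumnValue cs := by
  induction cs generalizing a with
  | nil => simp [hornerColumnValue]
  | cons c t ih =>
      simp only [List.foldl_cons, hornerColumnValue, List.length_cons]
      rw [ih, ih (0 * 26 + _)]
      ring

-- A's reversed-enumerate power sum equals B's forward Horner value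
theorem powerSum_eq_horner (cs : List Char) :
    (PySem.List.enumerate cs.reverse 0).foldl
        (fun acc p => acc + ((p.2.toNat : Int) - 65 + 1) * (26 ^ p.1.toNat : Int)) 0
      = hornerColumnValue cs := by
  induction cs with
  | nil => simp [hornerColumnValue]
  | cons c t ih =>
      have hrev : (c :: t).reverse = t.reverse ++ [c] := by simp
      rw [hrev, PySem.List.enumerate_append]
      rw [List.foldl_append]
      simp only [PySem.List.enumerate, List.length_reverse]
      simp only [List.foldl_cons, List.foldl_nil]
      rw [ih]
      have : hornerColumnValue (c :: t)
          = ((c.toNat : Int) - 65 + 1) * 26 ^ t.length + hornerColumnValue t := by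
        have h0 : hornerColumnValue (c :: t)
            = t.foldl (fun index c => index * 26 + ((c.toNat : Int) - 65 + 1))
                (0 * 26 + ((c.toNat : Int) - 65 + 1)) := rfl
        rw [h0, horner_init]
        generalize hornerColumnValue t = S
        ring
      rw [this]
      have hn : ((0 : Int) + (t.length : Int)).toNat = t.length := by omega
      rw [hn]
      generalize hornerColumnValue t = S
      ring

-- the two loop bodies are the same function
theorem step_eq :
    (fun (columns : PySem.Dict String Int) (kv : String × String) =>
      if PySem.Str.isIn "Column" kv.2 then
        let column : String :=
          PySem.Str.strip (PySem.Str.upper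
            ((PySem.List.pyGet? (PySem.Str.split₀ kv.2) (-1)).getD ""))
        let index : Int :=
          (PySem.List.enumerate column.toList.reverse 0).foldl
            (fun acc p => acc + ((p.2.toNat : Int) - 65 + 1) * (26 ^ p.1.toNat : Int)) 0 - 1
        columns.insert kv.1 index
      else columns)
    = (fun (d : PySem.Dict String Int) kv =>
      if PySem.Str.isIn "Column" kv.2 then
        d.insert kv.1
          (hornerColumnValue
            (PySem.Str.strip (PySem.Str.upper
              ((PySem.List.pyGet? (PySem.Str.split₀ kv.2) (-1)).getD ""))).toList - 1)
      else d) := by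
  funext d kv
  by_cases h : PySem.Str.isIn "Column" kv.2
  · simp only [if_pos h, powerSum_eq_horner]
  · rw [if_neg h, if_neg h]

-- ===== VERDICT (by name: the statement is the Claim_ definition above) =====
theorem columns_to_index_spec : Claim_equal_columns_to_index := by
  intro obj _
  unfold Spec_columns_to_index columns_to_index columns_to_index_alt
  rw [step_eq]
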